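-- pv_equiv track=rewrite | github.com/Code-Sloth/TIL | baek/codereview/6.22/176962_이민욱.py | solution
-- ===== SOURCE A (Python) =====
-- def solution(plans):
--     answer = []
--     stop = []
--     plan = sorted(plans, key=lambda x:x[1])
--
--     for i in range(len(plan) - 1):
--         # 현재 과목 시작 시간(분) - 다음 과목 시작 시간(분)
--         time = (int(plan[i][1].split(':')[0]) - int(plan[i+1][1].split(':')[0]))*60 + (int(plan[i][1].split(':')[1]) - int(plan[i+1][1].split(':')[1]))
--         # 현재 과목 진행한 시간만큼 빼줌 = 현재 과목 남은 시간
--         remain_time = int(plan[i][2]) + time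
--
--         if remain_time > 0:   # 시간이 남아있으면
--             stop.append([plan[i][0], remain_time])
--         else:   # 다 들었으면
--             answer.append(plan[i][0])
--             while stop and remain_time < 0: # 멈춘 과목이 있고, 남은 시간이 음수일 때
--                 remain_time += stop[-1][1]  # 남은 시간에 멈춘 과목의 남은 시간을 더함
--                 if remain_time > 0:
--                     stop[-1][1] = remain_time   # 남은 시간만큼 줬으니 갱신
--                 else:
--                     answer.append(stop.pop()[0])    # 시간을 다 줬으면 답에 추가
--
--     answer.append(plan[-1][0])  # 마지막 과목을 추가
--     for s in stop[::-1]:        # 남은 멈춘 과목들을 순서대로 추가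
--         answer.append(s[0])
--
--     return answer
-- ===== SOURCE B (Python) =====
-- def solution(plans):
--     # Recursive event simulation: sort once, parse each needed field once into
--     # (name, duration, gap-to-next-start) steps, then push each task onto a
--     # stack and spend the gap against it with a single unified drain helper.
--     order = sorted(plans, key=lambda p: p[1])
--     steps = [(p[0], int(p[2]), minutes(q[1]) - minutes(p[1])) for p, q in zip(order, order[1:])]
--     return run(steps, order[-1][0], [], [])
--
--
-- def minutes(s):
--     parts = s.split(':')
--     return int(parts[0]) * 60 + int(parts[1])
--
--
-- def run(steps, last, stack, done):
--     if not steps: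
--         return done + [last] + [s[0] for s in reversed(stack)]
--     name, dur, gap = steps[0]
--     stack, done = spend(stack + [(name, dur)], done, gap)
--     return run(steps[1:], last, stack, done)
--
--
-- def spend(stack, done, t):
--     if not stack:
--         return stack, done
--     name, rem = stack[-1]
--     if rem > t:
--         return stack[:-1] + [(name, rem - t)], done
--     if t - rem <= 0:
--         return stack[:-1], done + [name]
--     return spend(stack[:-1], done + [name], t - rem)
-- ===== Notes on version B (the rewrite author's own statement) =====
-- stated objective: alternative
-- what changed: Replaced A's index loop (which re-splits each time string up to four times per step and branches into a push case or a separate in-place while-drain, then appends the last name and the reversed stack) by a recursive event simulation: each needed field is parsed once into (name, duration, gap-to-next-start) steps and one unified recursive 'spend' helper both updates the stack top and finishes tasks.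
import Mathlib
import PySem

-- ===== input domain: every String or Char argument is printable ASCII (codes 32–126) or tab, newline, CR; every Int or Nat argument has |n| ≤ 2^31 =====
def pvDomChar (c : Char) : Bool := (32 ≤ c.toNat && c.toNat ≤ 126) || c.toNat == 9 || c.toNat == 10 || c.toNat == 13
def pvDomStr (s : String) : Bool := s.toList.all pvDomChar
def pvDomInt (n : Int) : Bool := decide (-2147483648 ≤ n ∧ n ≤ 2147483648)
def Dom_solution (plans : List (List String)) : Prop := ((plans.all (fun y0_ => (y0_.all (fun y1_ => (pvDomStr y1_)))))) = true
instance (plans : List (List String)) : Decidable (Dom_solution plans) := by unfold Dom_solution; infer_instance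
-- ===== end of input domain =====

-- B replaces A's index loop (repeated string re-splits, push-or-while-drain with in-place
-- mutation) by a recursive event simulation over once-parsed tuples with one unified
-- 'spend' drain; same results, same asymptotic cost.

-- shared tiny Python-builtin helpers (int(s) and s.split(':'); defaults unreachable under Pre_)
def pyInt (s : String) : Int := (PySem.Int.ofStr? s).getD 0
def colonSplit (s : String) : List String := (PySem.Str.split? s ":").getD []

-- ===== PORT A =====
def aRow (plan : List (List String)) (i : Int) : List String := PySem.List.pyGetD plan i []
def aGet (row : List String) (j : Int) : String := PySem.List.pyGetD row j ""
-- int(plan[i][1].split(':')[j])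
def aPart (plan : List (List String)) (i : Int) (j : Int) : Int :=
  pyInt (PySem.List.pyGetD (colonSplit (aGet (aRow plan i) 1)) j "")

-- the inner 'while stop and remain_time < 0:' loop of A
def aWhile (stop : List (String × Int)) (answer : List String) (remain : Int) :
    List (String × Int) × List String :=
  if h : stop ≠ [] ∧ remain < 0 then
    let p := PySem.List.pyGetD stop (-1) ("", 0)                     -- stop[-1]
    let remain' := remain + p.2
    if remain' > 0 then (stop.dropLast ++ [(p.1, remain')], answer)  -- stop[-1][1] = remain'
    else aWhile stop.dropLast (answer ++ [p.1]) remain'              -- answer.append(stop.pop()[0])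
  else (stop, answer)
termination_by stop.length
decreasing_by
  have h1 : stop.length ≠ 0 := by simpa [List.length_eq_zero_iff] using h.1
  simp [List.length_dropLast]
  omega

-- one iteration of A's main 'for i in range(len(plan) - 1):' loop, state = (answer, stop)
def aStep (plan : List (List String)) (st : List String × List (String × Int)) (i : Int) :
    List String × List (String × Int) :=
  let time := (aPart plan i 0 - aPart plan (i + 1) 0) * 60 + (aPart plan i 1 - aPart plan (i + 1) 1)
  let remain := pyInt (aGet (aRow plan i) 2) + time
  if remain > 0 then (st.1, st.2 ++ [(aGet (aRow plan i) 0, remain)])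
  else
    let r := aWhile st.2 (st.1 ++ [aGet (aRow plan i) 0]) remain
    (r.2, r.1)

def solution (plans : List (List String)) : List String :=
  let plan := PySem.List.sorted plans (fun x => PySem.List.pyGetD x 1 "") false
  let st := (PySem.List.pyRange 0 ((plan.length : Int) - 1) 1).foldl (aStep plan) ([], [])
  let answer := st.1 ++ [aGet (aRow plan (-1)) 0]                    -- answer.append(plan[-1][0])
  ((PySem.List.slice? st.2 none none (-1)).getD []).foldl            -- for s in stop[::-1]:
    (fun acc s => acc ++ [s.1]) answer                               --   answer.append(s[0])

-- ===== PORT B =====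
def bMinutes (s : String) : Int :=
  let parts := colonSplit s
  pyInt (PySem.List.pyGetD parts 0 "") * 60 + pyInt (PySem.List.pyGetD parts 1 "")

def bSpend (stack : List (String × Int)) (done : List String) (t : Int) :
    List (String × Int) × List String :=
  if h : stack = [] then (stack, done)
  else
    let p := PySem.List.pyGetD stack (-1) ("", 0)
    if p.2 > t then (stack.dropLast ++ [(p.1, p.2 - t)], done)
    else if t - p.2 ≤ 0 then (stack.dropLast, done ++ [p.1])
    else bSpend stack.dropLast (done ++ [p.1]) (t - p.2)
termination_by stack.length
decreasing_by
  have h1 : stack.length ≠ 0 := by simpa [List.length_eq_zero_iff] using h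
  simp [List.length_dropLast]
  omega

-- one step of B: (p[0], int(p[2]), minutes(q[1]) - minutes(p[1])) for a consecutive pair p, q
def bStep (p : List String) (q : List String) : String × Int × Int :=
  (PySem.List.pyGetD p 0 "", pyInt (PySem.List.pyGetD p 2 ""),
   bMinutes (PySem.List.pyGetD q 1 "") - bMinutes (PySem.List.pyGetD p 1 ""))

def bRun : List (String × Int × Int) → String → List (String × Int) → List String → List String
  | [], last, stack, done => done ++ [last] ++ stack.reverse.map (·.1)
  | (name, dur, gap) :: rest, last, stack, done =>
    let r := bSpend (stack ++ [(name, dur)]) done gap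
    bRun rest last r.1 r.2

def solution_alt (plans : List (List String)) : List String :=
  let order := PySem.List.sorted plans (fun x => PySem.List.pyGetD x 1 "") false
  let steps := (order.zip (PySem.List.slice order (some 1) none)).map (fun pq => bStep pq.1 pq.2)
  bRun steps (PySem.List.pyGetD (PySem.List.pyGetD order (-1) []) 0 "") [] []

-- ===== PRECONDITION & SPEC =====
-- Pre_ excludes exactly the inputs on which Python A raises: the empty list, a row
-- shorter than 2 (sort key / name), and — when there are at least two rows, so the main
-- loop runs — an unparsable hour/minute field anywhere or, in every row but the
-- last-sorted one, a length < 3 or an unparsable duration field.  (The sort here keys on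
-- the code points of row[1], the same order Python's str < gives.)
def Pre_solution (plans : List (List String)) : Prop :=
  plans ≠ [] ∧ (∀ p ∈ plans, 2 ≤ p.length) ∧
  (2 ≤ plans.length →
    (∀ p ∈ plans, 2 ≤ (colonSplit (p.getD 1 "")).length ∧
      (PySem.Int.ofStr? ((colonSplit (p.getD 1 "")).getD 0 "")).isSome = true ∧
      (PySem.Int.ofStr? ((colonSplit (p.getD 1 "")).getD 1 "")).isSome = true) ∧
    (∀ p ∈ (PySem.List.sorted plans (fun x => (PySem.List.pyGetD x 1 "").toList) false).dropLast,
      3 ≤ p.length ∧ (PySem.Int.ofStr? (p.getD 2 "")).isSome = true))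
instance (plans : List (List String)) : Decidable (Pre_solution plans) := by
  unfold Pre_solution; infer_instance

def pvWitness_solution : List (List String) :=
  [["korean", "11:40", "30"], ["english", "12:10", "20"], ["math", "12:30", "40"]]

def Spec_solution (plans : List (List String)) (out : List String) : Prop := out = solution_alt plans
instance (plans : List (List String)) (out : List String) : Decidable (Spec_solution plans out) := by unfold Spec_solution; infer_instance

-- ===== CLAIM (what is proved, stated in full; the proofs are below) =====
def Claim_equal_solution : Prop := ∀ (plans : List (List String)), Dom_solution plans → Pre_solution plans → Spec_solution plans (solution plans)

-- ===== LEMMAS AND PROOFS =====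

theorem pyGetD_concat_neg_one {α : Type} (l : List α) (p : α) (d : α) :
    PySem.List.pyGetD (l ++ [p]) (-1) d = p := by
  simp [PySem.List.pyGetD, PySem.List.pyGet?, PySem.List.pyIdx?]

-- B's spend coincides with A's while-drain on a positive deficit
theorem bSpend_eq_aWhile (stack : List (String × Int)) :
    ∀ (done : List String) (t : Int), 0 < t → bSpend stack done t = aWhile stack done (-t) := by
  induction stack using List.reverseRecOn with
  | nil =>
    intro done t ht
    rw [bSpend, aWhile]
    simp
  | append_singleton l p ih =>
    intro done t ht
    have hne : l ++ [p] ≠ [] := by simp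
    rw [bSpend, aWhile]
    rw [dif_neg (by simp : ¬ (l ++ [p] = [])), dif_pos ⟨hne, by omega⟩]
    simp only [pyGetD_concat_neg_one, List.dropLast_concat]
    by_cases h1 : p.2 > t
    · rw [if_pos h1, if_pos (show -t + p.2 > 0 by omega)]
      have : p.2 - t = -t + p.2 := by omega
      rw [this]
    · rw [if_neg h1, if_neg (show ¬ (-t + p.2 > 0) by omega)]
      by_cases h2 : t - p.2 ≤ 0
      · rw [if_pos h2]
        have hz : -t + p.2 = 0 := by omega
        rw [hz, aWhile]
        simp
      · rw [if_neg h2]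
        have := ih (done ++ [p.1]) (t - p.2) (by omega)
        rw [this]
        have : -(t - p.2) = -t + p.2 := by omega
        rw [this]

-- pushing a fresh task and spending the gap = A's branch on remain = dur - t
theorem bSpend_push (stack : List (String × Int)) (done : List String) (name : String) (dur t : Int) :
    bSpend (stack ++ [(name, dur)]) done t =
      if dur - t > 0 then (stack ++ [(name, dur - t)], done)
      else aWhile stack (done ++ [name]) (dur - t) := by
  rw [bSpend]
  rw [dif_neg (by simp : ¬ (stack ++ [(name, dur)] = []))]
  simp only [pyGetD_concat_neg_one, List.dropLast_concat]
  by_cases h1 : dur > t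
  · rw [if_pos h1, if_pos (show dur - t > 0 by omega)]
  · rw [if_neg h1, if_neg (show ¬ (dur - t > 0) by omega)]
    by_cases h2 : t - dur ≤ 0
    · rw [if_pos h2]
      have hz : dur - t = 0 := by omega
      rw [hz, aWhile]
      simp
    · rw [if_neg h2]
      rw [bSpend_eq_aWhile _ _ _ (by omega : 0 < t - dur)]
      have : -(t - dur) = dur - t := by omega
      rw [this]

theorem aRow_natCast (plan : List (List String)) (k : Nat) (hk : k < plan.length) :
    aRow plan (k : Int) = plan[k] := by
  simp [aRow, PySem.List.pyGetD_natCast, List.getD_eq_getElem?_getD, hk]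

-- one A-iteration is exactly push + spend
theorem aStep_eq (plan : List (List String)) (k : Nat) (hk' : k < plan.length)
    (hk1 : k + 1 < plan.length) (done : List String) (stack : List (String × Int)) :
    aStep plan (done, stack) (k : Int) =
      ((bSpend (stack ++ [(PySem.List.pyGetD plan[k] 0 "", pyInt (PySem.List.pyGetD plan[k] 2 ""))]) done
          (bMinutes (PySem.List.pyGetD plan[k + 1] 1 "") - bMinutes (PySem.List.pyGetD plan[k] 1 ""))).2,
       (bSpend (stack ++ [(PySem.List.pyGetD plan[k] 0 "", pyInt (PySem.List.pyGetD plan[k] 2 ""))]) done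
          (bMinutes (PySem.List.pyGetD plan[k + 1] 1 "") - bMinutes (PySem.List.pyGetD plan[k] 1 ""))).1) := by
  rw [bSpend_push]
  have hcast : (k : Int) + 1 = ((k + 1 : Nat) : Int) := by push_cast; ring
  simp only [aStep, aPart, aGet, hcast, aRow_natCast plan k hk', aRow_natCast plan (k + 1) hk1,
    bMinutes]
  generalize pyInt (PySem.List.pyGetD (colonSplit (PySem.List.pyGetD plan[k] 1 "")) 0 "") = a0
  generalize pyInt (PySem.List.pyGetD (colonSplit (PySem.List.pyGetD plan[k] 1 "")) 1 "") = a1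
  generalize pyInt (PySem.List.pyGetD (colonSplit (PySem.List.pyGetD plan[k + 1] 1 "")) 0 "") = b0
  generalize pyInt (PySem.List.pyGetD (colonSplit (PySem.List.pyGetD plan[k + 1] 1 "")) 1 "") = b1
  generalize pyInt (PySem.List.pyGetD plan[k] 2 "") = d
  have he : d + ((a0 - b0) * 60 + (a1 - b1)) = d - (b0 * 60 + b1 - (a0 * 60 + a1)) := by ring
  rw [he]
  split_ifs <;> rfl

-- A's final appends, as a function of the loop state
def finishA (plan : List (List String)) (st : List String × List (String × Int)) : List String :=
  st.1 ++ [aGet (aRow plan (-1)) 0] ++ st.2.reverse.map (·.1)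

-- the main loop-vs-recursion correspondence, from position k with n - k = m + 1 rows left
theorem runA_eq (plan : List (List String)) :
    ∀ (m k : Nat), k + (m + 1) = plan.length →
    ∀ (done : List String) (stack : List (String × Int)),
      finishA plan ((PySem.List.pyRange (k : Int) ((plan.length : Int) - 1) 1).foldl
        (aStep plan) (done, stack))
      = bRun (((plan.drop k).zip (plan.drop k).tail).map (fun pq => bStep pq.1 pq.2))
          (aGet (aRow plan (-1)) 0) stack done := by
  intro m
  induction m with
  | zero =>
    intro k hk done stack
    have hk' : k < plan.length := by omega
    have hrange : PySem.List.pyRange (k : Int) ((plan.length : Int) - 1) 1 = [] := by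
      rw [PySem.List.pyRange_one]
      have h0 : (((plan.length : Int) - 1) - (k : Int)).toNat = 0 := by omega
      rw [h0]
      rfl
    have hdrop : plan.drop k = [plan[k]] := by
      rw [List.drop_eq_getElem_cons hk', List.drop_eq_nil_of_le (by omega)]
    rw [hrange, hdrop]
    simp [finishA, bRun]
  | succ m ih =>
    intro k hk done stack
    have hk' : k < plan.length := by omega
    have hk1 : k + 1 < plan.length := by omega
    have h1 : (k : Int) < (plan.length : Int) - 1 := by omega
    have h5 : plan.drop k = plan[k] :: plan.drop (k + 1) := List.drop_eq_getElem_cons hk'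
    have h6 : plan.drop (k + 1) = plan[k + 1] :: plan.drop (k + 2) := List.drop_eq_getElem_cons hk1
    rw [PySem.List.pyRange_one_cons h1, List.foldl_cons, aStep_eq plan k hk' hk1 done stack]
    have hcast : (k : Int) + 1 = ((k + 1 : Nat) : Int) := by push_cast; ring
    have ihs := ih (k + 1) (by omega)
      (bSpend (stack ++ [(PySem.List.pyGetD plan[k] 0 "", pyInt (PySem.List.pyGetD plan[k] 2 ""))]) done
          (bMinutes (PySem.List.pyGetD plan[k + 1] 1 "") - bMinutes (PySem.List.pyGetD plan[k] 1 ""))).2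
      (bSpend (stack ++ [(PySem.List.pyGetD plan[k] 0 "", pyInt (PySem.List.pyGetD plan[k] 2 ""))]) done
          (bMinutes (PySem.List.pyGetD plan[k + 1] 1 "") - bMinutes (PySem.List.pyGetD plan[k] 1 ""))).1
    rw [h6] at ihs
    rw [hcast, ihs, h5]
    simp only [List.tail_cons]
    rw [h6]
    simp only [List.zip_cons_cons, List.map_cons, bRun, bStep]

-- ===== VERDICT (by name: the statement is the Claim_ definition above) =====
theorem solution_spec : Claim_equal_solution := by
  unfold Claim_equal_solution
  intro plans _hdom hpre
  unfold Spec_solution solution solution_alt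
  have hne : PySem.List.sorted plans (fun x => PySem.List.pyGetD x 1 "") false ≠ [] := by
    rw [Ne, PySem.List.sorted_eq_nil_iff]
    exact hpre.1
  have hlen : 1 ≤ (PySem.List.sorted plans (fun x => PySem.List.pyGetD x 1 "") false).length := by
    have := List.length_pos_of_ne_nil hne
    omega
  have hrev : ∀ (L : List (String × Int)), (PySem.List.slice? L none none (-1)).getD [] = L.reverse := by
    intro L
    simp [pysem]
  have hslice : ∀ (L : List (List String)), PySem.List.slice L (some 1) none = L.tail := by
    intro L
    simp [pysem, List.drop_one]
  have hmain := runA_eq (PySem.List.sorted plans (fun x => PySem.List.pyGetD x 1 "") false)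
    ((PySem.List.sorted plans (fun x => PySem.List.pyGetD x 1 "") false).length - 1) 0
    (by omega) [] []
  simp only [Nat.cast_zero, List.drop_zero, finishA, aGet, aRow] at hmain
  simp only [hrev, hslice, PySem.List.foldl_append_singleton_eq_map]
  simpa [List.append_assoc] using hmain
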